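-- pv_equiv track=rewrite | github.com/KittyNeverDies/BAC.Public | bucket/utils/edit.py | prepare_strings
-- ===== SOURCE A (Python) =====
-- def prepare_strings(out):
--     temp = ""
--     split = str(list(str(out)))
--     final_result = []
--     for char in range(0, len(split)-3):
--         if split[char] != "\\" and split[char + 1] != "r" or split[char] == "\\" and split[char + 1] != "r":
--             temp += split[char]
--         else:
--             final_result.append(temp)
--             temp = ""
--     return final_result
-- ===== SOURCE B (Python) =====
-- def prepare_strings(out):
--     s = str(list(str(out)))
--     cuts = [c for c in range(len(s) - 3) if s[c + 1] == "r"]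
--     final_result = []
--     prev = -1
--     for c in cuts:
--         final_result.append(s[prev + 1:c])
--         prev = c
--     return final_result
-- ===== Notes on version B (the rewrite author's own statement) =====
-- stated objective: alternative
-- what changed: Replaces the streaming character accumulator with an index-first strategy: one pass collects the flush positions (indices whose successor is 'r'), a second pass slices the repr string between consecutive flush positions.
import Mathlib
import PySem

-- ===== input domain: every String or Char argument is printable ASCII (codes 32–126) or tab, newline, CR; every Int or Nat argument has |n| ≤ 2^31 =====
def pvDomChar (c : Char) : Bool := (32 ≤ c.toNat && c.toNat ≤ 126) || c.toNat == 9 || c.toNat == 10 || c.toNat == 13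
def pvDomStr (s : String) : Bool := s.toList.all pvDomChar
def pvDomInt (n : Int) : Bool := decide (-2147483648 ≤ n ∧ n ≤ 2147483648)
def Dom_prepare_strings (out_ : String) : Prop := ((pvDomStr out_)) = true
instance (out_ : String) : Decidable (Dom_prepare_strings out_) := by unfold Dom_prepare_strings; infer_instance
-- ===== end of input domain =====

-- B replaces A's streaming accumulator by an index-first decomposition (collect the
-- flush positions, then slice between them): an alternative of the same cost.

-- ===== PORT A =====
-- shared helper: Python's str(list(str(out))) — repr of one character (exact for the
-- printable-ASCII + tab/newline/CR domain) and of a list of one-character strings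
def pvReprChar (c : Char) : List Char :=
  if c = '\\' then ['\'', '\\', '\\', '\'']
  else if c = '\r' then ['\'', '\\', 'r', '\'']
  else if c = '\n' then ['\'', '\\', 'n', '\'']
  else if c = '\t' then ['\'', '\\', 't', '\'']
  else if c = '\'' then ['"', '\'', '"']
  else ['\'', c, '\'']

def pvListRepr (cs : List Char) : List Char :=
  '[' :: (List.intercalate [',', ' '] (cs.map pvReprChar)) ++ [']']

-- A's loop body: state = (temp, final_result)
def pvAStep (split : List Char) (st : List Char × List String) (ch : Int) :
    List Char × List String :=
  let ci := PySem.List.pyGetD split ch ' '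
  let cn := PySem.List.pyGetD split (ch + 1) ' '
  if (ci ≠ '\\' ∧ cn ≠ 'r') ∨ (ci = '\\' ∧ cn ≠ 'r') then (st.1 ++ [ci], st.2)
  else ([], st.2 ++ [String.ofList st.1])

def prepare_strings (out_ : String) : List String :=
  let split := pvListRepr out_.toList
  let n : Int := split.length
  ((PySem.List.pyRange 0 (n - 3) 1).foldl (pvAStep split) ([], [])).2

-- ===== PORT B =====
-- B's cut predicate: position c is a flush position when s[c+1] == 'r'
def pvCut (s : List Char) (c : Int) : Bool := PySem.List.pyGetD s (c + 1) ' ' == 'r'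

-- B's second pass: state = (final_result, prev)
def pvBStep (s : List Char) (st : List String × Int) (c : Int) : List String × Int :=
  (st.1 ++ [String.ofList (PySem.List.slice s (some (st.2 + 1)) (some c))], c)

def prepare_strings_alt (out_ : String) : List String :=
  let s := pvListRepr out_.toList
  let n : Int := s.length
  let cuts := (PySem.List.pyRange 0 (n - 3) 1).filter (pvCut s)
  (cuts.foldl (pvBStep s) ([], -1)).1

-- ===== PRECONDITION & SPEC =====
def Spec_prepare_strings (out_ : String) (out : List String) : Prop := out = prepare_strings_alt out_
instance (out_ : String) (out : List String) : Decidable (Spec_prepare_strings out_ out) := by unfold Spec_prepare_strings; infer_instance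

-- ===== CLAIM (what is proved, stated in full; the proofs are below) =====
def Claim_equal_prepare_strings : Prop := ∀ (out_ : String), Dom_prepare_strings out_ → Spec_prepare_strings out_ (prepare_strings out_)

-- ===== LEMMAS AND PROOFS =====

-- A's if-condition is just "the next character is not 'r'"
lemma pvAStep_cond (ci cn : Char) :
    ((ci ≠ '\\' ∧ cn ≠ 'r') ∨ (ci = '\\' ∧ cn ≠ 'r')) ↔ cn ≠ 'r' := by
  by_cases h : ci = '\\' <;> simp [h]

lemma pvGet_succ (s : List Char) (m : Nat) :
    PySem.List.pyGetD s ((m : Int) + 1) ' ' = s.getD (m + 1) ' ' := by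
  rw [show ((m : Int) + 1) = ((m + 1 : Nat) : Int) by push_cast; ring,
    PySem.List.pyGetD_natCast]

lemma pvCut_eq (s : List Char) (m : Nat) :
    pvCut s (m : Int) = (s.getD (m + 1) ' ' == 'r') := by
  rw [pvCut, pvGet_succ]

lemma pvAStep_flush (s : List Char) (a : List Char × List String) (m : Nat)
    (hr : s.getD (m + 1) ' ' = 'r') :
    pvAStep s a (m : Int) = ([], a.2 ++ [String.ofList a.1]) := by
  simp only [pvAStep, pvGet_succ, PySem.List.pyGetD_natCast]
  rw [if_neg]
  rw [pvAStep_cond]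
  exact not_not_intro hr

lemma pvAStep_acc (s : List Char) (a : List Char × List String) (m : Nat)
    (hr : ¬ s.getD (m + 1) ' ' = 'r') :
    pvAStep s a (m : Int) = (a.1 ++ [s.getD m ' '], a.2) := by
  simp only [pvAStep, pvGet_succ, PySem.List.pyGetD_natCast]
  rw [if_pos]
  rw [pvAStep_cond]
  exact hr

-- one accumulation step extends the current slice by one character
lemma pv_take_succ (s : List Char) (p m : Nat) (hpm : p ≤ m) (hlen : m < s.length) :
    (s.drop p).take (m - p) ++ [s.getD m ' '] = (s.drop p).take (m + 1 - p) := by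
  have hsub : m + 1 - p = (m - p) + 1 := by omega
  have hlt : m - p < (s.drop p).length := by rw [List.length_drop]; omega
  rw [hsub, List.take_add_one, List.getElem?_eq_getElem hlt]
  have h2 : (s.drop p)[m - p] = s[p + (m - p)]'(by omega) := List.getElem_drop ..
  simp [h2, show p + (m - p) = m by omega, List.getD_eq_getElem?_getD,
    List.getElem?_eq_getElem hlen]

-- Core invariant: after processing indices 0..m-1, A's final list equals B's fold over
-- the cut positions, A's temp is the slice since the last flush, B's prev = last cut.
lemma pv_core (s : List Char) (m : Nat) (hm : ∀ k, k < m → k + 1 < s.length) :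
    ∃ p : Nat, p ≤ m ∧
      (((List.range m).map (fun k : Nat => (k : Int))).foldl (pvAStep s) ([], [])).2
        = ((((List.range m).map (fun k : Nat => (k : Int))).filter (pvCut s)).foldl
            (pvBStep s) ([], -1)).1 ∧
      ((((List.range m).map (fun k : Nat => (k : Int))).filter (pvCut s)).foldl
          (pvBStep s) ([], -1)).2 = (p : Int) - 1 ∧
      (((List.range m).map (fun k : Nat => (k : Int))).foldl (pvAStep s) ([], [])).1
        = (s.drop p).take (m - p) := by
  induction m with
  | zero => exact ⟨0, by simp⟩
  | succ m ih =>
    obtain ⟨p, hpm, hfin, hp, htemp⟩ := ih (fun k hk => hm k (Nat.lt_succ_of_lt hk))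
    rw [List.range_succ, List.map_append, List.map_cons, List.map_nil, List.filter_append,
      List.foldl_append, List.foldl_append]
    set A := ((List.range m).map (fun k : Nat => (k : Int))).foldl (pvAStep s) ([], []) with hA
    set B := (((List.range m).map (fun k : Nat => (k : Int))).filter (pvCut s)).foldl
      (pvBStep s) ([], -1) with hB
    by_cases hr : s.getD (m + 1) ' ' = 'r'
    · -- index m is a flush position
      have hcut : pvCut s (m : Int) = true := by
        rw [pvCut_eq]; simp only [beq_iff_eq]; exact hr
      refine ⟨m + 1, by omega, ?_, ?_, ?_⟩
      · rw [List.filter_cons_of_pos hcut, List.filter_nil]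
        simp only [List.foldl_cons, List.foldl_nil, pvBStep, pvAStep_flush s A m hr,
          hfin, htemp, hp]
        rw [show ((p : Int) - 1 + 1) = ((p : Nat) : Int) by ring, PySem.List.slice_natCast]
      · rw [List.filter_cons_of_pos hcut, List.filter_nil]
        simp only [List.foldl_cons, List.foldl_nil, pvBStep]
        push_cast; ring
      · simp [pvAStep_flush s A m hr]
    · -- index m accumulates
      have hcut : pvCut s (m : Int) = false := by
        rw [pvCut_eq]; simp only [beq_eq_false_iff_ne, ne_eq]; exact hr
      have hlen : m < s.length := by have := hm m (Nat.lt_succ_self m); omega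
      refine ⟨p, by omega, ?_, ?_, ?_⟩
      · rw [List.filter_cons_of_neg (by simp [hcut]), List.filter_nil, List.foldl_nil]
        simp only [List.foldl_cons, List.foldl_nil, pvAStep_acc s A m hr]
        exact hfin
      · rw [List.filter_cons_of_neg (by simp [hcut]), List.filter_nil, List.foldl_nil]
        exact hp
      · simp only [List.foldl_cons, List.foldl_nil, pvAStep_acc s A m hr, htemp]
        exact pv_take_succ s p m hpm hlen

-- ===== VERDICT (by name: the statement is the Claim_ definition above) =====
theorem prepare_strings_spec : Claim_equal_prepare_strings := by
  intro out_ _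
  unfold Spec_prepare_strings prepare_strings prepare_strings_alt
  simp only
  set s := pvListRepr out_.toList with hs
  have hrange : PySem.List.pyRange 0 ((s.length : Int) - 3) 1
      = (List.range (((s.length : Int) - 3 - 0).toNat)).map (fun k : Nat => (k : Int)) := by
    rw [PySem.List.pyRange_one]; simp
  rw [hrange]
  have hm : ∀ k, k < (((s.length : Int) - 3) - 0).toNat → k + 1 < s.length := by
    intro k hk; omega
  obtain ⟨p, -, h1, -, -⟩ := pv_core s ((((s.length : Int) - 3) - 0).toNat) hm
  exact h1
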